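-- pv_equiv track=rewrite | github.com/saltastroops/data-archive-database | tests/ssda/util/test_fits.py | fake_iglob
-- ===== SOURCE A (Python) =====
-- from typing import Iterator, NamedTuple
--
-- def fake_iglob(path: str) -> Iterator[str]:
--     jan_1 = "2019-01-01"
--     jan_2 = "2019-01-02"
--     oct_27 = "2019-10-27"
--     oct_28 = "2019-10-28"
--
--     files = []
--     if "RSS" in path:
--         if jan_1 in path:
--             files = ["RSS_A.fits", "RSS_B.fits"]
--         if jan_2 in path:
--             files = ["RSS_C.fits"]
--         if oct_27 in path:
--             files = ["RSS_D.fits", "RSS_E.fits", "RSS_F.fits"]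
--         if oct_28 in path:
--             files = ["RSS_G.fits"]
--     if "Salticam" in path:
--         if jan_1 in path:
--             files = []
--         if jan_2 in path:
--             files = ["Salticam_A.fits"]
--         if oct_27 in path:
--             files = ["Salticam_B.fits"]
--         if oct_28 in path:
--             files = ["Salticam_C.fits"]
--     if "HRS" in path:
--         if jan_1 in path:
--             files = []
--         if jan_2 in path:
--             files = ["HRS_A.fits"]
--         if oct_27 in path:
--             files = ["HRS_B.fits"]
--         if oct_28 in path:
--             files = ["HRS_C.fits"]
--
--     dir = path.replace("*.fits", "")
--     return (f"{dir}{file}" for file in files)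
-- ===== SOURCE B (Python) =====
-- _INSTRUMENTS = ("RSS", "Salticam", "HRS")
-- _DATES = ("2019-01-01", "2019-01-02", "2019-10-27", "2019-10-28")
-- _FILES = {
--     ("RSS", "2019-01-01"): ["RSS_A.fits", "RSS_B.fits"],
--     ("RSS", "2019-01-02"): ["RSS_C.fits"],
--     ("RSS", "2019-10-27"): ["RSS_D.fits", "RSS_E.fits", "RSS_F.fits"],
--     ("RSS", "2019-10-28"): ["RSS_G.fits"],
--     ("Salticam", "2019-01-02"): ["Salticam_A.fits"],
--     ("Salticam", "2019-10-27"): ["Salticam_B.fits"],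
--     ("Salticam", "2019-10-28"): ["Salticam_C.fits"],
--     ("HRS", "2019-01-02"): ["HRS_A.fits"],
--     ("HRS", "2019-10-27"): ["HRS_B.fits"],
--     ("HRS", "2019-10-28"): ["HRS_C.fits"],
-- }
--
--
-- def fake_iglob(path: str):
--     # A's overwrite cascade makes the LAST instrument and LAST date found in the
--     # path decide the result, so pick those two winners directly and do one
--     # dictionary lookup (missing pairs, e.g. Salticam/HRS on 2019-01-01, give []).
--     instrument = next((i for i in reversed(_INSTRUMENTS) if i in path), None)
--     date = next((d for d in reversed(_DATES) if d in path), None)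
--     files = _FILES.get((instrument, date), [])
--     dir = path.replace("*.fits", "")
--     return (f"{dir}{file}" for file in files)
-- ===== Notes on version B (the rewrite author's own statement) =====
-- stated objective: alternative
-- what changed: Instead of replaying A's overwrite cascade, B picks the winning instrument and date independently (last one present in the path) and does a single dictionary lookup on that pair, defaulting to [].
import Mathlib
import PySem

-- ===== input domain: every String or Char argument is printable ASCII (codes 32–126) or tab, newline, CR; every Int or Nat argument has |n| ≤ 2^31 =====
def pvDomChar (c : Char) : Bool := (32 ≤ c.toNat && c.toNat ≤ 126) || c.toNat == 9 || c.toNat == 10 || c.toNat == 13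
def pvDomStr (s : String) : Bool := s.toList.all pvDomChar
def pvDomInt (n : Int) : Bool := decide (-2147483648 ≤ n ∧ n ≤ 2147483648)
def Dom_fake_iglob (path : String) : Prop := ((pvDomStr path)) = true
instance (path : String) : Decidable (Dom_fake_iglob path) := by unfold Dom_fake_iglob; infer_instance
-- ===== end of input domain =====

-- B replaces A's overwrite cascade by choosing the last instrument and last date present in the
-- path and doing one dictionary lookup on that pair (alternative decomposition, same cost).

-- ===== PORT A =====
def fake_iglob (path : String) : List String :=
  let files : List String := []
  let files :=
    if PySem.Str.isIn "RSS" path then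
      let files := if PySem.Str.isIn "2019-01-01" path then ["RSS_A.fits", "RSS_B.fits"] else files
      let files := if PySem.Str.isIn "2019-01-02" path then ["RSS_C.fits"] else files
      let files := if PySem.Str.isIn "2019-10-27" path then ["RSS_D.fits", "RSS_E.fits", "RSS_F.fits"] else files
      let files := if PySem.Str.isIn "2019-10-28" path then ["RSS_G.fits"] else files
      files
    else files
  let files :=
    if PySem.Str.isIn "Salticam" path then
      let files := if PySem.Str.isIn "2019-01-01" path then ([] : List String) else files
      let files := if PySem.Str.isIn "2019-01-02" path then ["Salticam_A.fits"] else files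
      let files := if PySem.Str.isIn "2019-10-27" path then ["Salticam_B.fits"] else files
      let files := if PySem.Str.isIn "2019-10-28" path then ["Salticam_C.fits"] else files
      files
    else files
  let files :=
    if PySem.Str.isIn "HRS" path then
      let files := if PySem.Str.isIn "2019-01-01" path then ([] : List String) else files
      let files := if PySem.Str.isIn "2019-01-02" path then ["HRS_A.fits"] else files
      let files := if PySem.Str.isIn "2019-10-27" path then ["HRS_B.fits"] else files
      let files := if PySem.Str.isIn "2019-10-28" path then ["HRS_C.fits"] else files
      files
    else files
  let dir := PySem.Str.replace path "*.fits" ""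
  files.map (fun file => dir ++ file)

-- ===== PORT B =====
def pvInstruments : List String := ["RSS", "Salticam", "HRS"]
def pvDates : List String := ["2019-01-01", "2019-01-02", "2019-10-27", "2019-10-28"]
def pvFiles : PySem.Dict (String × String) (List String) :=
  PySem.Dict.ofList
  [ (("RSS", "2019-01-01"), ["RSS_A.fits", "RSS_B.fits"]),
    (("RSS", "2019-01-02"), ["RSS_C.fits"]),
    (("RSS", "2019-10-27"), ["RSS_D.fits", "RSS_E.fits", "RSS_F.fits"]),
    (("RSS", "2019-10-28"), ["RSS_G.fits"]),
    (("Salticam", "2019-01-02"), ["Salticam_A.fits"]),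
    (("Salticam", "2019-10-27"), ["Salticam_B.fits"]),
    (("Salticam", "2019-10-28"), ["Salticam_C.fits"]),
    (("HRS", "2019-01-02"), ["HRS_A.fits"]),
    (("HRS", "2019-10-27"), ["HRS_B.fits"]),
    (("HRS", "2019-10-28"), ["HRS_C.fits"]) ]

def fake_iglob_alt (path : String) : List String :=
  let instrument := pvInstruments.reverse.find? (fun i => PySem.Str.isIn i path)
  let date := pvDates.reverse.find? (fun d => PySem.Str.isIn d path)
  -- _FILES.get((instrument, date), []): a key containing None matches no dict entry,
  -- so the lookup only happens when both options are some.
  let files :=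
    match instrument, date with
    | some i, some d => PySem.Dict.getD pvFiles (i, d) []
    | _, _ => ([] : List String)
  let dir := PySem.Str.replace path "*.fits" ""
  files.map (fun file => dir ++ file)

-- ===== PRECONDITION & SPEC =====
def Spec_fake_iglob (path : String) (out : List String) : Prop := out = fake_iglob_alt path
instance (path : String) (out : List String) : Decidable (Spec_fake_iglob path out) := by unfold Spec_fake_iglob; infer_instance

-- ===== CLAIM =====
def Claim_equal_fake_iglob : Prop := ∀ (path : String), Dom_fake_iglob path → Spec_fake_iglob path (fake_iglob path)

-- ===== LEMMAS AND PROOFS =====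
theorem pvLook_0 : PySem.Dict.getD pvFiles ("RSS", "2019-01-01") ([] : List String) = ["RSS_A.fits", "RSS_B.fits"] := by rfl
theorem pvLook_1 : PySem.Dict.getD pvFiles ("RSS", "2019-01-02") ([] : List String) = ["RSS_C.fits"] := by rfl
theorem pvLook_2 : PySem.Dict.getD pvFiles ("RSS", "2019-10-27") ([] : List String) = ["RSS_D.fits", "RSS_E.fits", "RSS_F.fits"] := by rfl
theorem pvLook_3 : PySem.Dict.getD pvFiles ("RSS", "2019-10-28") ([] : List String) = ["RSS_G.fits"] := by rfl
theorem pvLook_4 : PySem.Dict.getD pvFiles ("Salticam", "2019-01-01") ([] : List String) = ([] : List String) := by rfl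
theorem pvLook_5 : PySem.Dict.getD pvFiles ("Salticam", "2019-01-02") ([] : List String) = ["Salticam_A.fits"] := by rfl
theorem pvLook_6 : PySem.Dict.getD pvFiles ("Salticam", "2019-10-27") ([] : List String) = ["Salticam_B.fits"] := by rfl
theorem pvLook_7 : PySem.Dict.getD pvFiles ("Salticam", "2019-10-28") ([] : List String) = ["Salticam_C.fits"] := by rfl
theorem pvLook_8 : PySem.Dict.getD pvFiles ("HRS", "2019-01-01") ([] : List String) = ([] : List String) := by rfl
theorem pvLook_9 : PySem.Dict.getD pvFiles ("HRS", "2019-01-02") ([] : List String) = ["HRS_A.fits"] := by rfl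
theorem pvLook_10 : PySem.Dict.getD pvFiles ("HRS", "2019-10-27") ([] : List String) = ["HRS_B.fits"] := by rfl
theorem pvLook_11 : PySem.Dict.getD pvFiles ("HRS", "2019-10-28") ([] : List String) = ["HRS_C.fits"] := by rfl


-- ===== VERDICT =====
set_option maxHeartbeats 2000000 in
theorem fake_iglob_spec : Claim_equal_fake_iglob := by
  intro path _
  unfold Spec_fake_iglob fake_iglob fake_iglob_alt pvInstruments pvDates
  simp only [List.reverse_cons, List.reverse_nil, List.nil_append, List.cons_append,
    List.find?]
  cases hr : PySem.Str.isIn "RSS" path <;>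
  cases hs : PySem.Str.isIn "Salticam" path <;>
  cases hh : PySem.Str.isIn "HRS" path <;>
  cases h1 : PySem.Str.isIn "2019-01-01" path <;>
  cases h2 : PySem.Str.isIn "2019-01-02" path <;>
  cases h3 : PySem.Str.isIn "2019-10-27" path <;>
  cases h4 : PySem.Str.isIn "2019-10-28" path <;>
  simp only [hr, hs, hh, h1, h2, h3, h4, List.find?, Bool.false_eq_true, if_true, if_false,
    pvLook_0, pvLook_1, pvLook_2, pvLook_3, pvLook_4, pvLook_5, pvLook_6, pvLook_7,
    pvLook_8, pvLook_9, pvLook_10, pvLook_11, List.map_nil, List.map_cons] <;> rfl
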